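-- pv_equiv track=rewrite | github.com/KuaaPoH/DGA | testdvrp.py | get_total_cost
-- ===== SOURCE A (Python) =====
-- def get_total_cost(routes, c, d):
--     total = 0
--     for r in routes:
--         if not r: continue
--         cost = c[0][r[0]] + d[r[0]]
--         for i in range(len(r) - 1): cost += c[r[i]][r[i+1]] + d[r[i+1]]
--         cost += c[r[-1]][0]; total += cost
--     return total
-- ===== SOURCE B (Python) =====
-- def get_total_cost(routes, c, d):
--     # Aggregate multiplicities first: count how often each directed edge and each
--     # customer node occurs across all routes, then charge each distinct edge/node once,
--     # multiplied by its count.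
--     edges = []
--     nodes = []
--     for r in routes:
--         if not r:
--             continue
--         edges += zip([0] + r, r + [0])
--         nodes += r
--     ec = {}
--     for e in edges:
--         ec[e] = ec.get(e, 0) + 1
--     nc = {}
--     for x in nodes:
--         nc[x] = nc.get(x, 0) + 1
--     return sum(c[a][b] * k for (a, b), k in ec.items()) + sum(d[x] * k for x, k in nc.items())
-- ===== Notes on version B (the rewrite author's own statement) =====
-- stated objective: alternative
-- what changed: A accumulates each route's cost in one interleaved indexed loop (leading edge+demand, range(len(r)-1) inner loop, trailing edge); B instead collects all directed edges and visited nodes across routes, counts multiplicities in two dicts, and charges each distinct edge c[a][b] and node demand d[x] once multiplied by its count.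
import Mathlib
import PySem

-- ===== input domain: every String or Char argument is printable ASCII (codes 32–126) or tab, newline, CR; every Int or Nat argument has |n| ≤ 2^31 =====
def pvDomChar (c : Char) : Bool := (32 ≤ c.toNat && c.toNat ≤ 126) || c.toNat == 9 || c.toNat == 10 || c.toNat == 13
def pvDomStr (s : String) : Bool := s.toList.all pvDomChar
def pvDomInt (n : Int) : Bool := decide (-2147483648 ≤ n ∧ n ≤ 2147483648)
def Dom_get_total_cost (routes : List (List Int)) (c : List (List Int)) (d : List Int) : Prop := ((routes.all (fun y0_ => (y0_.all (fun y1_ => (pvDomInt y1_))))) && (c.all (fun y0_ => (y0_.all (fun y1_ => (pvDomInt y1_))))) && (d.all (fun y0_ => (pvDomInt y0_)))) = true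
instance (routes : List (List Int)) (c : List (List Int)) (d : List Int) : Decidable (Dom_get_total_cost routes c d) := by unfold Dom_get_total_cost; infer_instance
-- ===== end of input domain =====

-- B replaces A's interleaved per-route accumulation by a different algorithm: it collects all
-- directed edges and visited nodes, counts multiplicities in dicts, and charges each distinct
-- edge/node once times its count (objective: alternative, same asymptotic cost).


-- shared indexing helpers: c[a][b] and d[x] (total forms; Pre_ guarantees the lookups are in range)
def cAt (c : List (List Int)) (a b : Int) : Int :=
  PySem.List.pyGetD (PySem.List.pyGetD c a []) b 0

def dAt (d : List Int) (x : Int) : Int :=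
  PySem.List.pyGetD d x 0

-- ===== PORT A =====
def get_total_cost (routes : List (List Int)) (c : List (List Int)) (d : List Int) : Int :=
  routes.foldl (fun total r =>
    if r = [] then total
    else
      let r0 := PySem.List.pyGetD r 0 0
      let cost := cAt c 0 r0 + dAt d r0
      let cost := (PySem.List.pyRange 0 ((r.length : Int) - 1) 1).foldl
        (fun cost i =>
          cost + (cAt c (PySem.List.pyGetD r i 0) (PySem.List.pyGetD r (i + 1) 0)
                  + dAt d (PySem.List.pyGetD r (i + 1) 0))) cost
      total + (cost + cAt c (PySem.List.pyGetD r (-1) 0) 0)) 0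

-- ===== PORT B =====
-- the edge/node collection loop of Source B (edges += zip([0]+r, r+[0]); nodes += r)
def pvCollect (routes : List (List Int)) : List (Int × Int) × List Int :=
  routes.foldl (fun p r =>
    if r = [] then p else (p.1 ++ ((0 :: r).zip (r ++ [0])), p.2 ++ r)) ([], [])

def get_total_cost_alt (routes : List (List Int)) (c : List (List Int)) (d : List Int) : Int :=
  let en := pvCollect routes
  let ec := en.1.foldl (fun (m : PySem.Dict (Int × Int) Int) e => m.insert e (m.getD e 0 + 1)) PySem.Dict.empty
  let nc := en.2.foldl (fun (m : PySem.Dict Int Int) x => m.insert x (m.getD x 0 + 1)) PySem.Dict.empty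
  (ec.items.map (fun p => cAt c p.1.1 p.1.2 * p.2)).sum
    + (nc.items.map (fun p => dAt d p.1 * p.2)).sum

-- ===== PRECONDITION & SPEC =====
-- Pre_: exactly the inputs on which A raises no IndexError — every demand index of every
-- nonempty route is in range for d, and every consecutive pair (a,b) of the padded path
-- [0]+r+[0] has a in range for c and b in range for the row c[a].
def Pre_get_total_cost (routes : List (List Int)) (c : List (List Int)) (d : List Int) : Prop :=
  ∀ r ∈ routes, r ≠ [] →
    (∀ x ∈ r, PySem.Raise.InRange d.length x) ∧
    (∀ p ∈ ((0 :: r ++ [0]).zip (r ++ [0])),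
      PySem.Raise.InRange c.length p.1 ∧
      PySem.Raise.InRange ((PySem.List.pyGetD c p.1 []).length) p.2)

instance (routes : List (List Int)) (c : List (List Int)) (d : List Int) : Decidable (Pre_get_total_cost routes c d) := by
  unfold Pre_get_total_cost; infer_instance

def pvWitness_get_total_cost : List (List Int) × List (List Int) × List Int :=
  ([[1], [0, 1]], [[1, 2], [3, 4]], [5, 6])

def Spec_get_total_cost (routes : List (List Int)) (c : List (List Int)) (d : List Int) (out : Int) : Prop := out = get_total_cost_alt routes c d
instance (routes : List (List Int)) (c : List (List Int)) (d : List Int) (out : Int) : Decidable (Spec_get_total_cost routes c d out) := by unfold Spec_get_total_cost; infer_instance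

-- ===== CLAIM (what is proved, stated in full; the proofs are below) =====
def Claim_equal_get_total_cost : Prop := ∀ (routes : List (List Int)) (c : List (List Int)) (d : List Int), Dom_get_total_cost routes c d → Pre_get_total_cost routes c d → Spec_get_total_cost routes c d (get_total_cost routes c d)

-- ===== LEMMAS AND PROOFS =====

-- summing f over the distinct elements weighted by multiplicity is summing f over the list
theorem sum_mul_count {α : Type} [DecidableEq α] [BEq α] [LawfulBEq α] (xs : List α) (f : α → Int) :
    ((PySem.Set.ofList xs).map (fun k => f k * (xs.count k : Int))).sum = (xs.map f).sum := by
  rw [Finset.sum_list_map_count xs f]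
  rw [← List.sum_toFinset _ (PySem.Set.nodup_ofList xs)]
  have h : (PySem.Set.ofList xs).toFinset = xs.toFinset := by
    ext x; simp [PySem.Set.mem_ofList]
  rw [h]
  refine Finset.sum_congr rfl fun m _ => ?_
  have hc : @List.count α instBEqOfDecidableEq m xs = @List.count α _ m xs := by
    congr 1
    exact lawful_beq_subsingleton _ _
  simp [hc, mul_comm]

-- a counting loop's items, multiplied through f and summed, give the plain list sum
theorem counter_items_sum {α : Type} [DecidableEq α] [BEq α] [LawfulBEq α]
    (xs : List α) (f : α → Int) :
    ((xs.foldl (fun (m : PySem.Dict α Int) e => m.insert e (m.getD e 0 + 1)) PySem.Dict.empty).items.map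
      (fun p => f p.1 * p.2)).sum = (xs.map f).sum := by
  rw [PySem.Dict.foldl_insert_getD_add_one_eq_counter, PySem.Dict.items_counter, List.map_map]
  exact sum_mul_count xs f

-- adjacent-pair sum, the shape A's per-route cost reduces to
def pairSum (c : List (List Int)) (l : List Int) : Int :=
  ((l.zip l.tail).map (fun p => cAt c p.1 p.2)).sum

lemma pairSum_cons₂ (c : List (List Int)) (x y : Int) (t : List Int) :
    pairSum c (x :: y :: t) = cAt c x y + pairSum c (y :: t) := by
  simp [pairSum]

-- appending a node at the end adds one trailing edge
lemma pairSum_append_singleton (c : List (List Int)) (l : List Int) (hl : l ≠ []) (b : Int) :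
    pairSum c (l ++ [b]) = pairSum c l + cAt c (l.getLast hl) b := by
  induction l with
  | nil => exact absurd rfl hl
  | cons x t ih =>
    cases t with
    | nil => simp [pairSum]
    | cons y t' =>
      simp only [List.cons_append] at ih ⊢
      rw [pairSum_cons₂, pairSum_cons₂, ih (by simp), ← add_assoc]
      rfl

-- pairSum as an indexed sum over range (the shape A's inner loop produces)
lemma pairSum_eq_range (c : List (List Int)) :
    ∀ l : List Int,
      pairSum c l =
        ((List.range (l.length - 1)).map
          (fun k => cAt c (l.getD k 0) (l.getD (k + 1) 0))).sum := by
  intro l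
  induction l with
  | nil => simp [pairSum]
  | cons x t ih =>
    cases t with
    | nil => simp [pairSum]
    | cons y t' =>
      rw [pairSum_cons₂, ih]
      have hlen : (x :: y :: t').length - 1 = ((y :: t').length - 1) + 1 := by simp
      rw [hlen, List.range_succ_eq_map, List.map_cons, List.sum_cons, List.map_map]
      congr 1

-- demand indices: the range form picks exactly the tail
lemma map_range_getD (t : List Int) :
    (List.range t.length).map (fun k => t.getD k 0) = t := by
  induction t with
  | nil => simp
  | cons a t ih =>
    simp only [List.length_cons]
    rw [List.range_succ_eq_map, List.map_cons, List.map_map]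
    exact congrArg _ ih

lemma dsum_eq_range (d : List Int) (x : Int) (t : List Int) :
    ((List.range ((x :: t).length - 1)).map
      (fun k => dAt d ((x :: t).getD (k + 1) 0))).sum
      = (t.map (fun z => dAt d z)).sum := by
  have h : (List.range t.length).map (fun k => dAt d ((x :: t).getD (k + 1) 0))
      = t.map (fun z => dAt d z) := by
    calc (List.range t.length).map (fun k => dAt d ((x :: t).getD (k + 1) 0))
        = ((List.range t.length).map (fun k => t.getD k 0)).map (fun z => dAt d z) := by
          rw [List.map_map]; rfl
      _ = t.map (fun z => dAt d z) := by rw [map_range_getD]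
  simp only [List.length_cons, Nat.add_sub_cancel]
  rw [h]

-- A's inner indexed loop, rewritten as two clean sums
lemma inner_loop_eq (c : List (List Int)) (d : List Int) (r : List Int) (hr : r ≠ []) (acc : Int) :
    (PySem.List.pyRange 0 ((r.length : Int) - 1) 1).foldl
      (fun cost i =>
        cost + (cAt c (PySem.List.pyGetD r i 0) (PySem.List.pyGetD r (i + 1) 0)
                + dAt d (PySem.List.pyGetD r (i + 1) 0))) acc
    = acc + pairSum c r + (r.tail.map (fun z => dAt d z)).sum := by
  obtain ⟨x, t, rfl⟩ := List.exists_cons_of_ne_nil hr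
  have hlen : ((x :: t).length : Int) - 1 = (t.length : Int) := by simp
  rw [hlen, PySem.List.pyRange_zero_natCast, List.foldl_map, PySem.List.foldl_add]
  have hmap : (List.range t.length).map
      (fun k : Nat => cAt c (PySem.List.pyGetD (x :: t) ((k : Int)) 0) (PySem.List.pyGetD (x :: t) ((k : Int) + 1) 0)
                + dAt d (PySem.List.pyGetD (x :: t) ((k : Int) + 1) 0))
      = (List.range t.length).map
        (fun k => cAt c ((x :: t).getD k 0) ((x :: t).getD (k + 1) 0)
                  + dAt d ((x :: t).getD (k + 1) 0)) := by
    apply List.map_congr_left; intro k _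
    have h1 : ((k : Int) + 1) = ((k + 1 : Nat) : Int) := by push_cast; ring
    rw [h1, PySem.List.pyGetD_natCast, PySem.List.pyGetD_natCast]
  rw [hmap, PySem.List.sum_map_add_int, pairSum_eq_range c (x :: t)]
  have hd := dsum_eq_range d x t
  simp only [List.length_cons, Nat.add_sub_cancel, List.tail_cons] at hd ⊢
  rw [hd]
  ring

-- B's per-route edge batch zip([0]+r, r+[0]) is the adjacent-pair sum of the padded path
lemma zipSum_eq_pairSum (c : List (List Int)) (r : List Int) :
    (((0 :: r).zip (r ++ [0])).map (fun p => cAt c p.1 p.2)).sum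
      = pairSum c (0 :: (r ++ [0])) := by
  have hz : ((0 :: r) ++ [0]).zip ((r ++ [0]) ++ ([] : List Int))
      = (0 :: r).zip (r ++ [0]) ++ ([0] : List Int).zip ([] : List Int) := by
    apply List.zip_append
    simp
  simp only [List.zip_nil_right, List.append_nil] at hz
  simp only [pairSum, List.tail_cons]
  rw [show (0 : Int) :: (r ++ [0]) = (0 :: r) ++ [0] by simp, hz]

-- the padded-path pair sum decomposed into leading edge, interior, trailing edge
lemma pairSum_padded (c : List (List Int)) (r : List Int) (hr : r ≠ []) :
    pairSum c (0 :: (r ++ [0]))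
      = cAt c 0 (r.getD 0 0) + pairSum c r + cAt c (r.getLast hr) 0 := by
  obtain ⟨x, t, rfl⟩ := List.exists_cons_of_ne_nil hr
  rw [show (0 : Int) :: ((x :: t) ++ [0]) = (0 :: x :: t) ++ [0] by simp,
    pairSum_append_singleton c (0 :: x :: t) (by simp), pairSum_cons₂]
  rw [List.getLast_cons (by simp)]
  simp

-- A's per-route body equals B's per-route edge batch plus B's demand batch
lemma body_eq (c : List (List Int)) (d : List Int) (r : List Int) (hr : r ≠ []) :
    ((PySem.List.pyRange 0 ((r.length : Int) - 1) 1).foldl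
       (fun cost i =>
         cost + (cAt c (PySem.List.pyGetD r i 0) (PySem.List.pyGetD r (i + 1) 0)
                 + dAt d (PySem.List.pyGetD r (i + 1) 0)))
       (cAt c 0 (PySem.List.pyGetD r 0 0) + dAt d (PySem.List.pyGetD r 0 0)))
      + cAt c (PySem.List.pyGetD r (-1) 0) 0
    = (((0 :: r).zip (r ++ [0])).map (fun p => cAt c p.1 p.2)).sum
      + (r.map (fun z => dAt d z)).sum := by
  obtain ⟨x, t, rfl⟩ := List.exists_cons_of_ne_nil hr
  rw [inner_loop_eq c d (x :: t) (by simp), zipSum_eq_pairSum,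
    pairSum_padded c (x :: t) (by simp)]
  rw [PySem.List.pyGetD_neg_one _ _ (by simp)]
  simp [PySem.List.pyGetD_zero_cons]
  ring

-- A equals the sums over B's collected edge and node lists
lemma total_eq_collect (routes : List (List Int)) (c : List (List Int)) (d : List Int) :
    get_total_cost routes c d
      = ((pvCollect routes).1.map (fun e => cAt c e.1 e.2)).sum
        + ((pvCollect routes).2.map (fun z => dAt d z)).sum := by
  unfold get_total_cost pvCollect
  induction routes using List.reverseRecOn with
  | nil => rfl
  | append_singleton rs r ih =>
    rw [List.foldl_append, List.foldl_append, ih]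
    simp only [List.foldl_cons, List.foldl_nil]
    by_cases hr : r = []
    · simp [hr]
    · simp only [if_neg hr, List.map_append, List.sum_append]
      rw [body_eq c d r hr]
      ring

-- ===== VERDICT (by name: the statement is the Claim_ definition above) =====
theorem get_total_cost_spec : Claim_equal_get_total_cost := by
  intro routes c d hDom hPre
  clear hDom hPre
  unfold Spec_get_total_cost get_total_cost_alt
  have h1 := counter_items_sum (pvCollect routes).1 (fun e => cAt c e.1 e.2)
  have h2 := counter_items_sum (pvCollect routes).2 (fun z => dAt d z)
  simp only [] at h1 h2 ⊢
  rw [h1, h2]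
  exact total_eq_collect routes c d
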